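-- pv_equiv track=rewrite | github.com/pypi-data/pypi-mirror-263 | packages/GeoMergerDI/GeoMergerDI-3.0.0.tar.gz/GeoMergerDI-3.0.0/GeoMergerDI/MunMergerAlgorithm.py | get_true_parents
-- ===== SOURCE A (Python) =====
-- def get_true_parents(parents: dict):
--     keys = parents.keys()
--     for key in keys:
--         parent_key = parents[key]
--         while parent_key in keys:
--             parent_key = parents[parent_key]
--
--         parents[key] = parent_key
--
--     return parents
-- ===== SOURCE B (Python) =====
-- def get_true_parents(parents: dict):
--     # Memoized root resolution with path compression: every node on a walked
--     # chain gets its root cached, so later walks stop at the first cached node.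
--     # Mutates and returns `parents` in place, like the original.
--     memo = {}
--     for key in parents:
--         v = parents[key]
--         stack = []
--         while v in parents and v not in memo:
--             stack.append(v)
--             v = parents[v]
--         r = memo.get(v, v)
--         for u in stack:
--             memo[u] = r
--         parents[key] = r
--     return parents
-- ===== Notes on version B (the rewrite author's own statement) =====
-- stated objective: alternative
-- what changed: A re-walks each key's parent chain from scratch with no caching; B walks each chain once and caches the resolved root of every node on the walked path in a memo dict (path compression), so later walks stop at the first cached node; on the generator's random inputs chains are short and a timing run found no speed-up.
import Mathlib
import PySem

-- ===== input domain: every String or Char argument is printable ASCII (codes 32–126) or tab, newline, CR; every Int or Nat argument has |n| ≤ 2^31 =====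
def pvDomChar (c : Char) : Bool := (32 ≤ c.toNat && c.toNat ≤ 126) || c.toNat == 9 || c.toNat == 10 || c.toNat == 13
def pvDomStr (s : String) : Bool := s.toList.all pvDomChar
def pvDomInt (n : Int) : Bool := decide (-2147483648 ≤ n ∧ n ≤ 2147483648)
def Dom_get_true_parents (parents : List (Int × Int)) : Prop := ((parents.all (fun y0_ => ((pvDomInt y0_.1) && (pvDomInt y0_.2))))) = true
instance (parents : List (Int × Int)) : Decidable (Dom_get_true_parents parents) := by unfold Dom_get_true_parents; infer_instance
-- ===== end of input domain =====

-- B replaces A's per-key uncached chain walking by memoized walks with path compression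
-- (each node's resolved root is cached the first time its chain is walked); both mutate the
-- dict in place in Python (same mutation), the equivalence is about the returned list.

-- ===== PORT A =====
-- Python's `while parent_key in keys: parent_key = parents[parent_key]`.
-- `keys` is the keys view computed once; only values are ever overwritten, so it never changes.
-- The loop is fuel-bounded; Pre_ guarantees fuel K.length + 1 always suffices (proved below).
def pvWhileA (d : PySem.Dict Int Int) (K : List Int) : Nat → Int → Int
  | 0, v => v
  | f+1, v => if v ∈ K then pvWhileA d K f (d.getD v v) else v

def get_true_parents (parents : List (Int × Int)) : List (Int × Int) :=
  let d0 := PySem.Dict.ofList parents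
  let K := d0.keys
  (K.foldl (fun d k => d.insert k (pvWhileA d K (K.length + 1) (d.getD k k))) d0).items

-- ===== PORT B =====
-- `r = memo.get(v, v)`, then `for u in stack: memo[u] = r`
def pvFinishB (memo : PySem.Dict Int Int) (v : Int) (stack : List Int) : Int × PySem.Dict Int Int :=
  let r := memo.getD v v
  (r, stack.foldl (fun m u => m.insert u r) memo)

-- `while v in parents and v not in memo: stack.append(v); v = parents[v]`
-- membership in `parents` is membership in its (never-changing) key list K; fuel-bounded as in A.
def pvWalkB (d : PySem.Dict Int Int) (K : List Int) (memo : PySem.Dict Int Int) :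
    Nat → Int → List Int → Int × PySem.Dict Int Int
  | 0, v, stack => pvFinishB memo v stack
  | f+1, v, stack =>
    if v ∈ K ∧ memo.get? v = none then pvWalkB d K memo f (d.getD v v) (v :: stack)
    else pvFinishB memo v stack

def get_true_parents_alt (parents : List (Int × Int)) : List (Int × Int) :=
  let d0 := PySem.Dict.ofList parents
  let K := d0.keys
  (K.foldl (fun s k =>
      let res := pvWalkB s.1 K s.2 (K.length + 1) (s.1.getD k k) []
      (s.1.insert k res.1, res.2))
    (d0, PySem.Dict.empty)).1.items

-- ===== PRECONDITION & SPEC =====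
-- spec-side helpers: one step of the ORIGINAL map, and its n-fold iterate (the resolved root)
def pvStep (d0 : PySem.Dict Int Int) (v : Int) : Int := d0.getD v v
def pvRoot (d0 : PySem.Dict Int Int) (n : Nat) (v : Int) : Int := (pvStep d0)^[n] v

-- A (and B) loop forever exactly when some key's parent chain reaches a cycle of keys; Pre_
-- says every chain leaves the key set within |keys| steps, i.e. no cycle is reachable.
def Pre_get_true_parents (parents : List (Int × Int)) : Prop :=
  ∀ k ∈ (PySem.Dict.ofList parents : PySem.Dict Int Int).keys,
    pvRoot (PySem.Dict.ofList parents) (PySem.Dict.ofList parents).keys.length k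
      ∉ (PySem.Dict.ofList parents : PySem.Dict Int Int).keys
instance (parents : List (Int × Int)) : Decidable (Pre_get_true_parents parents) := by
  unfold Pre_get_true_parents; infer_instance

def pvWitness_get_true_parents : (List (Int × Int)) := ([(1, 2), (2, 3), (3, 4), (7, 1)])

def Spec_get_true_parents (parents : List (Int × Int)) (out : List (Int × Int)) : Prop := out = get_true_parents_alt parents
instance (parents : List (Int × Int)) (out : List (Int × Int)) : Decidable (Spec_get_true_parents parents out) := by unfold Spec_get_true_parents; infer_instance

-- ===== CLAIM (what is proved, stated in full; the proofs are below) =====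
def Claim_equal_get_true_parents : Prop := ∀ (parents : List (Int × Int)), Dom_get_true_parents parents → Pre_get_true_parents parents → Spec_get_true_parents parents (get_true_parents parents)

-- ===== LEMMAS AND PROOFS =====

-- a value outside the key set is a fixed point of pvStep
theorem pvStep_out (d0 : PySem.Dict Int Int) (v : Int) (hv : v ∉ d0.keys) :
    pvStep d0 v = v := by
  unfold pvStep
  refine PySem.Dict.getD_of_not_contains _ _ ?_
  rw [PySem.Dict.contains_eq_decide_mem_keys]
  simpa using hv

theorem pvIter_out (d0 : PySem.Dict Int Int) (m : Nat) (v : Int) (hv : v ∉ d0.keys) :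
    (pvStep d0)^[m] v = v := by
  induction m with
  | zero => rfl
  | succ m ih => rw [Function.iterate_succ_apply, pvStep_out d0 v hv, ih]

-- once the chain has left the key set it is stable
theorem pvIter_stable (d0 : PySem.Dict Int Int) (a b : Nat) (v : Int) (hab : a ≤ b)
    (h : (pvStep d0)^[a] v ∉ d0.keys) :
    (pvStep d0)^[b] v = (pvStep d0)^[a] v := by
  obtain ⟨c, rfl⟩ := Nat.exists_eq_add_of_le hab
  rw [Nat.add_comm, Function.iterate_add_apply]
  exact pvIter_out d0 c _ h

-- invariant of the mutated dict: every slot holds either its original value or its root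
def InvD (d0 d : PySem.Dict Int Int) (n : Nat) : Prop :=
  ∀ v, d.getD v v = pvStep d0 v ∨ (v ∈ d0.keys ∧ d.getD v v = pvRoot d0 n v)

-- invariant of B's memo: every entry is a key mapped to its root
def InvM (d0 : PySem.Dict Int Int) (n : Nat) (memo : PySem.Dict Int Int) : Prop :=
  ∀ v x, memo.get? v = some x → v ∈ d0.keys ∧ x = pvRoot d0 n v

def PreH (d0 : PySem.Dict Int Int) (n : Nat) : Prop :=
  ∀ k ∈ d0.keys, pvRoot d0 n k ∉ d0.keys

theorem pvRoot_out (d0 : PySem.Dict Int Int) (n : Nat) (v : Int) (hv : v ∉ d0.keys) :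
    pvRoot d0 n v = v := pvIter_out d0 n v hv

theorem pvRoot_step (d0 : PySem.Dict Int Int) (n : Nat) (v : Int)
    (hpre : PreH d0 n) (hv : v ∈ d0.keys) :
    pvRoot d0 n (pvStep d0 v) = pvRoot d0 n v := by
  show (pvStep d0)^[n] (pvStep d0 v) = pvRoot d0 n v
  rw [← Function.iterate_succ_apply]
  exact pvIter_stable d0 n (n + 1) v (Nat.le_succ n) (hpre v hv)

theorem pvWhileA_out (d : PySem.Dict Int Int) (K : List Int) (fuel : Nat) (v : Int)
    (hf : 0 < fuel) (hv : v ∉ K) : pvWhileA d K fuel v = v := by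
  cases fuel with
  | zero => omega
  | succ f => simp [pvWhileA, hv]

theorem pvWhileA_root (d0 d : PySem.Dict Int Int) (n : Nat)
    (hpre : PreH d0 n) (hinv : InvD d0 d n) :
    ∀ f fuel v, f < fuel → f ≤ n → (pvStep d0)^[f] v ∉ d0.keys →
      pvWhileA d d0.keys fuel v = pvRoot d0 n v := by
  intro f
  induction f with
  | zero =>
    intro fuel v hf _ hout
    rw [pvWhileA_out d _ fuel v hf hout, pvRoot_out d0 n v hout]
  | succ f ih =>
    intro fuel v hf hn hout
    by_cases hv : v ∈ d0.keys
    · cases fuel with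
      | zero => omega
      | succ fu =>
        rw [pvWhileA, if_pos hv]
        rcases hinv v with hL | ⟨_, hR⟩
        · rw [hL, ih fu (pvStep d0 v) (by omega) (by omega)
            (by rw [← Function.iterate_succ_apply]; exact hout),
            pvRoot_step d0 n v hpre hv]
        · have hrout : pvRoot d0 n v ∉ d0.keys := hpre v hv
          rw [hR, pvWhileA_out d _ fu _ (by omega) hrout]
    · rw [pvWhileA_out d _ fuel v (by omega) hv, pvRoot_out d0 n v hv]

-- A's body for key k yields exactly the root of k
theorem pvWhileA_key (d0 d : PySem.Dict Int Int) (n : Nat)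
    (hpre : PreH d0 n) (hinv : InvD d0 d n) (k : Int) (hk : k ∈ d0.keys) :
    pvWhileA d d0.keys (n + 1) (d.getD k k) = pvRoot d0 n k := by
  rcases hinv k with hL | ⟨_, hR⟩
  · rw [hL]
    have hout : (pvStep d0)^[n] (pvStep d0 k) ∉ d0.keys := by
      rw [← Function.iterate_succ_apply,
        pvIter_stable d0 n (n + 1) k (Nat.le_succ n) (hpre k hk)]
      exact hpre k hk
    rw [pvWhileA_root d0 d n hpre hinv n (n + 1) (pvStep d0 k) (by omega) le_rfl hout,
      pvRoot_step d0 n k hpre hk]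
  · have hrout : pvRoot d0 n k ∉ d0.keys := hpre k hk
    rw [hR, pvWhileA_out d _ (n + 1) _ (by omega) hrout]

theorem InvD_insert (d0 d : PySem.Dict Int Int) (n : Nat) (hinv : InvD d0 d n)
    (k : Int) (hk : k ∈ d0.keys) : InvD d0 (d.insert k (pvRoot d0 n k)) n := by
  intro v
  rw [PySem.Dict.getD_insert]
  by_cases hvk : v = k
  · subst hvk; rw [if_pos rfl]; exact Or.inr ⟨hk, rfl⟩
  · rw [if_neg hvk]; exact hinv v

-- memo lookups: a memoized value is the root; an unmemoized non-key resolves to itself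
theorem pvFinishB_spec (d0 memo : PySem.Dict Int Int) (n : Nat) (v : Int) (stack : List Int)
    (hm : InvM d0 n memo) (hv : memo.getD v v = pvRoot d0 n v)
    (hs : ∀ u ∈ stack, u ∈ d0.keys ∧ pvRoot d0 n u = pvRoot d0 n v) :
    (pvFinishB memo v stack).1 = pvRoot d0 n v ∧ InvM d0 n (pvFinishB memo v stack).2 := by
  unfold pvFinishB
  refine ⟨hv, ?_⟩
  rw [hv]
  clear hv
  induction stack generalizing memo with
  | nil => exact hm
  | cons u rest ih =>
    refine ih _ ?_ (fun u hu => hs u (List.mem_cons_of_mem _ hu))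
    intro w x hw
    rw [PySem.Dict.get?_insert] at hw
    by_cases hwu : w = u
    · rw [if_pos hwu] at hw
      obtain ⟨h1, h2⟩ := hs u List.mem_cons_self
      subst hwu
      injection hw with h
      exact ⟨h1, by rw [← h, h2]⟩
    · rw [if_neg hwu] at hw
      exact hm w x hw

theorem pvMemo_getD (d0 memo : PySem.Dict Int Int) (n : Nat) (hm : InvM d0 n memo)
    (v : Int) (h : v ∉ d0.keys ∨ (memo.get? v).isSome) :
    memo.getD v v = pvRoot d0 n v := by
  rcases hv : memo.get? v with _ | x
  · rcases h with h | h
    · rw [PySem.Dict.getD_of_get?_eq_none _ _ hv, pvRoot_out d0 n v h]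
    · rw [hv] at h; simp at h
  · rw [PySem.Dict.getD_of_get?_eq_some _ _ hv, (hm v x hv).2]

theorem pvWalkB_stop (d0 d memo : PySem.Dict Int Int) (n : Nat) (fuel : Nat) (v : Int)
    (stack : List Int) (hf : 0 < fuel) (hm : InvM d0 n memo) (hv : v ∉ d0.keys)
    (hs : ∀ u ∈ stack, u ∈ d0.keys ∧ pvRoot d0 n u = pvRoot d0 n v) :
    (pvWalkB d d0.keys memo fuel v stack).1 = pvRoot d0 n v ∧
      InvM d0 n (pvWalkB d d0.keys memo fuel v stack).2 := by
  cases fuel with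
  | zero => omega
  | succ fu =>
    rw [pvWalkB, if_neg (by intro h; exact hv h.1)]
    exact pvFinishB_spec d0 memo n v stack hm (pvMemo_getD d0 memo n hm v (Or.inl hv)) hs

theorem pvWalkB_root (d0 d memo : PySem.Dict Int Int) (n : Nat)
    (hpre : PreH d0 n) (hinv : InvD d0 d n) (hm : InvM d0 n memo) :
    ∀ f fuel v stack, f < fuel → f ≤ n → (pvStep d0)^[f] v ∉ d0.keys →
      (∀ u ∈ stack, u ∈ d0.keys ∧ pvRoot d0 n u = pvRoot d0 n v) →
      (pvWalkB d d0.keys memo fuel v stack).1 = pvRoot d0 n v ∧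
        InvM d0 n (pvWalkB d d0.keys memo fuel v stack).2 := by
  intro f
  induction f with
  | zero =>
    intro fuel v stack hf _ hout hs
    exact pvWalkB_stop d0 d memo n fuel v stack hf hm hout hs
  | succ f ih =>
    intro fuel v stack hf hn hout hs
    by_cases hv : v ∈ d0.keys
    · cases fuel with
      | zero => omega
      | succ fu =>
        rw [pvWalkB]
        by_cases hcond : v ∈ d0.keys ∧ memo.get? v = none
        · rw [if_pos hcond]
          rcases hinv v with hL | ⟨_, hR⟩
          · rw [hL]
            have hroot : pvRoot d0 n (pvStep d0 v) = pvRoot d0 n v :=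
              pvRoot_step d0 n v hpre hv
            refine (ih fu (pvStep d0 v) (v :: stack) (by omega) (by omega)
              (by rw [← Function.iterate_succ_apply]; exact hout) ?_).imp
              (fun h => by rw [h, hroot]) id
            intro u hu
            rcases List.mem_cons.mp hu with rfl | hu
            · exact ⟨hv, hroot.symm⟩
            · exact ⟨(hs u hu).1, by rw [(hs u hu).2, hroot]⟩
          · have hrout : pvRoot d0 n v ∉ d0.keys := hpre v hv
            rw [hR]
            refine (pvWalkB_stop d0 d memo n fu (pvRoot d0 n v) (v :: stack) (by omega)
              hm hrout ?_).imp (fun h1 => by rw [h1, pvRoot_out d0 n _ hrout]) id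
            intro u hu
            rw [pvRoot_out d0 n _ hrout]
            rcases List.mem_cons.mp hu with rfl | hu
            · exact ⟨hv, rfl⟩
            · exact hs u hu
        · rw [if_neg hcond]
          have hsome : (memo.get? v).isSome := by
            rcases h : memo.get? v with _ | x
            · exact absurd ⟨hv, h⟩ hcond
            · rfl
          exact pvFinishB_spec d0 memo n v stack hm
            (pvMemo_getD d0 memo n hm v (Or.inr hsome)) hs
    · exact pvWalkB_stop d0 d memo n fuel v stack (by omega) hm hv hs

-- B's body for key k yields exactly the root of k (and keeps the memo invariant)
theorem pvWalkB_key (d0 d memo : PySem.Dict Int Int) (n : Nat)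
    (hpre : PreH d0 n) (hinv : InvD d0 d n) (hm : InvM d0 n memo)
    (k : Int) (hk : k ∈ d0.keys) :
    (pvWalkB d d0.keys memo (n + 1) (d.getD k k) []).1 = pvRoot d0 n k ∧
      InvM d0 n (pvWalkB d d0.keys memo (n + 1) (d.getD k k) []).2 := by
  rcases hinv k with hL | ⟨_, hR⟩
  · have hout : (pvStep d0)^[n] (pvStep d0 k) ∉ d0.keys := by
      rw [← Function.iterate_succ_apply,
        pvIter_stable d0 n (n + 1) k (Nat.le_succ n) (hpre k hk)]
      exact hpre k hk
    have := pvWalkB_root d0 d memo n hpre hinv hm n (n + 1) (pvStep d0 k) []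
      (by omega) le_rfl hout (by simp)
    rw [hL]
    exact ⟨by rw [this.1, pvRoot_step d0 n k hpre hk], this.2⟩
  · have hrout : pvRoot d0 n k ∉ d0.keys := hpre k hk
    have := pvWalkB_stop d0 d memo n (n + 1) (pvRoot d0 n k) [] (by omega) hm hrout (by simp)
    rw [hR]
    exact ⟨by rw [this.1, pvRoot_out d0 n _ hrout], this.2⟩

-- the two folds keep identical dicts step by step
theorem pvFold_eq (d0 : PySem.Dict Int Int) (n : Nat) (hpre : PreH d0 n) :
    ∀ (ks : List Int), (∀ k ∈ ks, k ∈ d0.keys) →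
      ∀ (d memo : PySem.Dict Int Int), InvD d0 d n → InvM d0 n memo →
        ks.foldl (fun d k => d.insert k (pvWhileA d d0.keys (n + 1) (d.getD k k))) d =
        (ks.foldl (fun s k =>
            let res := pvWalkB s.1 d0.keys s.2 (n + 1) (s.1.getD k k) []
            (s.1.insert k res.1, res.2)) (d, memo)).1 := by
  intro ks
  induction ks with
  | nil => intro _ d memo _ _; rfl
  | cons k rest ih =>
    intro hks d memo hinv hm
    have hk : k ∈ d0.keys := hks k List.mem_cons_self
    have hA := pvWhileA_key d0 d n hpre hinv k hk
    have hB := pvWalkB_key d0 d memo n hpre hinv hm k hk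
    simp only [List.foldl_cons]
    rw [hA, hB.1]
    exact ih (fun u hu => hks u (List.mem_cons_of_mem _ hu))
      (d.insert k (pvRoot d0 n k)) _ (InvD_insert d0 d n hinv k hk) hB.2

-- ===== VERDICT (by name: the statement is the Claim_ definition above) =====
theorem get_true_parents_spec : Claim_equal_get_true_parents := by
  intro parents _ hpre
  unfold Spec_get_true_parents get_true_parents get_true_parents_alt
  have h := pvFold_eq (PySem.Dict.ofList parents) (PySem.Dict.ofList parents).keys.length
    hpre (PySem.Dict.ofList parents).keys (fun _ h => h)
    (PySem.Dict.ofList parents) PySem.Dict.empty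
    (fun v => Or.inl rfl)
    (fun v x h => by rw [PySem.Dict.get?_empty] at h; exact absurd h (by simp))
  simp only []
  rw [h]
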